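-- pv_equiv track=rewrite | github.com/yeseong31/coding-test | Programmers/etc/친구_추천.py | solution
-- ===== SOURCE A (Python) =====
-- from collections import defaultdict
--
-- def solution(user: str, friends: list[list[str]], visitors: list[str]) -> list[str]:
--     graph = defaultdict(set)
--     points = defaultdict(int)
--
--     for u1, u2 in friends:
--         graph[u1].add(u2)
--         graph[u2].add(u1)
--         points[u1] = points[u2] = 0
--
--     for visitor in visitors:
--         points[visitor] += 1
--         for target in graph[visitor]:
--             if target != user:
--                 points[target] += 10
--
--     result = []
--     for name in sorted(points, key=lambda x: (-points[x], x)):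
--         if name != user and name not in graph[user] and points[name] > 0:
--             result.append(name)
--     return result
-- ===== SOURCE B (Python) =====
-- from collections import Counter
--
--
-- def solution(user: str, friends: list[list[str]], visitors: list[str]) -> list[str]:
--     # Pull/gather formulation: one visit-count table (Counter) plus a per-node
--     # score computed from its friends, instead of A's per-visitor scatter loop.
--     graph = {}
--     for u1, u2 in friends:
--         graph.setdefault(u1, set()).add(u2)
--         graph.setdefault(u2, set()).add(u1)
--
--     visits = Counter(visitors)
--     candidates = dict.fromkeys(list(graph) + visitors)
--     blocked = graph.get(user, set())
--
--     scored = []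
--     for name in candidates:
--         if name == user or name in blocked:
--             continue
--         score = visits.get(name, 0) + 10 * sum(visits.get(f, 0) for f in graph.get(name, ()))
--         if score > 0:
--             scored.append((score, name))
--
--     scored.sort(key=lambda t: (-t[0], t[1]))
--     return [name for _, name in scored]
-- ===== Notes on version B (the rewrite author's own statement) =====
-- stated objective: alternative
-- what changed: Replaces A's per-visitor scatter loop (incrementing each visited friend's points) and its sort-then-filter over the points dict by a pull/gather formulation: one Counter of visits, each candidate's score computed directly as visits[name] + 10*sum(visits[f] for f in graph[name]), filtering first and sorting last.
import Mathlib
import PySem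

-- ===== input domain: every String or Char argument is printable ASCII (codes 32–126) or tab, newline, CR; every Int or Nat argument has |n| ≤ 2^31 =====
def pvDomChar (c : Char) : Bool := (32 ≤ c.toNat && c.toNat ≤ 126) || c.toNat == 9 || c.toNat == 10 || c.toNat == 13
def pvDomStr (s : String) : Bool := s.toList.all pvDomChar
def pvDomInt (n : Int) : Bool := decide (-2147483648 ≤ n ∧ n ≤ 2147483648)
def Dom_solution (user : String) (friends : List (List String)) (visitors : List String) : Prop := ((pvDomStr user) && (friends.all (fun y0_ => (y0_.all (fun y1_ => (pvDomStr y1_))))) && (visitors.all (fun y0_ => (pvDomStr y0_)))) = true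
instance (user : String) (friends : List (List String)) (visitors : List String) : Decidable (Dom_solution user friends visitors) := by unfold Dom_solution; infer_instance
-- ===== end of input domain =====

-- B replaces A's per-visitor scatter loop and sort-then-filter by a pull/gather
-- formulation (visit Counter + per-node score from its friends, filter first, sort last);
-- alternative decomposition, same observable return value.


-- ===== PORT A =====
-- graph[u1].add(u2); graph[u2].add(u1)   (defaultdict(set) indexing + in-place add)
def aGraphStep (g : PySem.Dict String (PySem.Set String)) (row : List String) : PySem.Dict String (PySem.Set String) :=
  let u1 := row.getD 0 ""      -- 'for u1, u2 in friends' unpacking (rows of length ≠ 2 raise: excluded by Pre_)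
  let u2 := row.getD 1 ""
  let g := g.insert u1 (PySem.Set.add (g.getD u1 PySem.Set.empty) u2)
  g.insert u2 (PySem.Set.add (g.getD u2 PySem.Set.empty) u1)

-- points[u1] = points[u2] = 0   (assigns left to right)
def aPointsStep (p : PySem.Dict String Int) (row : List String) : PySem.Dict String Int :=
  (p.insert (row.getD 0 "") 0).insert (row.getD 1 "") 0

-- one iteration of 'for visitor in visitors'
def aVisitStep (user : String) (st : PySem.Dict String (PySem.Set String) × PySem.Dict String Int)
    (visitor : String) : PySem.Dict String (PySem.Set String) × PySem.Dict String Int :=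
  let points := st.2.modify visitor 0 (· + 1)               -- points[visitor] += 1
  -- defaultdict access graph[visitor]: inserts an empty set when the key is missing
  let graph := if st.1.contains visitor then st.1 else st.1.insert visitor PySem.Set.empty
  let nbrs := graph.getD visitor PySem.Set.empty
  -- scatter over the friend set; the set's iteration order does not affect the resulting dict
  let points := nbrs.foldl (fun pts target => if target ≠ user then pts.modify target 0 (· + 10) else pts) points
  (graph, points)

def solution (user : String) (friends : List (List String)) (visitors : List String) : List String :=
  let st := friends.foldl (fun st row => (aGraphStep st.1 row, aPointsStep st.2 row))
      (PySem.Dict.empty, PySem.Dict.empty)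
  let st := visitors.foldl (aVisitStep user) st
  let graph := st.1
  let points := st.2
  -- 'name not in graph[user]': the defaultdict access may insert an empty entry, never observed afterwards
  let graphUser := graph.getD user PySem.Set.empty
  let names := PySem.List.sorted2 points.keys (fun x => -(points.getD x 0)) (fun x => x) false
  names.foldl (fun result name =>
    if name ≠ user ∧ ¬ graphUser.contains name = true ∧ points.getD name 0 > 0
    then result ++ [name] else result) []

-- ===== PORT B =====
-- graph.setdefault(u1, set()).add(u2); graph.setdefault(u2, set()).add(u1)
def bGraphStep (g : PySem.Dict String (PySem.Set String)) (row : List String) : PySem.Dict String (PySem.Set String) :=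
  let u1 := row.getD 0 ""      -- same 'u1, u2' unpacking as A (Pre_ guarantees rows of length 2)
  let u2 := row.getD 1 ""
  let g := g.setdefault u1 PySem.Set.empty
  let g := g.insert u1 (PySem.Set.add (g.getD u1 PySem.Set.empty) u2)
  let g := g.setdefault u2 PySem.Set.empty
  g.insert u2 (PySem.Set.add (g.getD u2 PySem.Set.empty) u1)

-- visits.get(name, 0) + 10 * sum(visits.get(f, 0) for f in graph.get(name, ()))
def bScore (visits : PySem.Dict String Int) (graph : PySem.Dict String (PySem.Set String)) (name : String) : Int :=
  visits.getD name 0 + 10 * ((graph.getD name PySem.Set.empty).map (fun f => visits.getD f 0)).sum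

def solution_alt (user : String) (friends : List (List String)) (visitors : List String) : List String :=
  let graph := friends.foldl bGraphStep PySem.Dict.empty
  let visits := PySem.Dict.counter visitors                       -- Counter(visitors)
  let candidates := PySem.List.dedup (graph.keys ++ visitors)     -- dict.fromkeys(list(graph) + visitors)
  let blocked := graph.getD user PySem.Set.empty                  -- graph.get(user, set())
  let scored := candidates.foldl (fun acc name =>
      if name = user ∨ blocked.contains name = true then acc
      else if bScore visits graph name > 0 then acc ++ [(bScore visits graph name, name)] else acc)
      ([] : List (Int × String))
  (PySem.List.sorted2 scored (fun t => -t.1) (fun t => t.2) false).map (fun t => t.2)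

-- ===== PRECONDITION & SPEC =====
-- Pre_ excludes exactly the inputs where Python A raises: 'for u1, u2 in friends'
-- raises ValueError unless every friends row has exactly two entries.
def Pre_solution (user : String) (friends : List (List String)) (visitors : List String) : Prop :=
  ∀ row ∈ friends, row.length = 2
instance (user : String) (friends : List (List String)) (visitors : List String) : Decidable (Pre_solution user friends visitors) := by unfold Pre_solution; infer_instance

def pvWitness_solution : String × List (List String) × List String :=
  ("bob", [["alice", "bob"], ["alice", "carol"]], ["carol", "dave", "carol"])

def Spec_solution (user : String) (friends : List (List String)) (visitors : List String) (out : List String) : Prop := out = solution_alt user friends visitors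
instance (user : String) (friends : List (List String)) (visitors : List String) (out : List String) : Decidable (Spec_solution user friends visitors out) := by unfold Spec_solution; infer_instance

-- ===== CLAIM (what is proved, stated in full; the proofs are below) =====
def Claim_equal_solution : Prop := ∀ (user : String) (friends : List (List String)) (visitors : List String), Dom_solution user friends visitors → Pre_solution user friends visitors → Spec_solution user friends visitors (solution user friends visitors)

-- ===== LEMMAS AND PROOFS =====
-- abbreviations for the proofs
def nbrOf (g : PySem.Dict String (PySem.Set String)) (x : String) : PySem.Set String :=
  g.getD x PySem.Set.empty

def flat2 (friends : List (List String)) : List String :=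
  friends.flatMap (fun r => [r.getD 0 "", r.getD 1 ""])

-- the symmetric edge relation named by the friends list
def FriendRel (friends : List (List String)) (a b : String) : Prop :=
  ∃ row ∈ friends, (a = row.getD 0 "" ∧ b = row.getD 1 "") ∨ (a = row.getD 1 "" ∧ b = row.getD 0 "")

lemma keys_insert_eq_add (d : PySem.Dict String (PySem.Set String)) (k : String) (v : PySem.Set String) :
    (d.insert k v).keys = PySem.Set.add d.keys k := by
  by_cases h : d.contains k = true
  · rw [PySem.Dict.keys_insert_of_contains d v h, PySem.Set.add_of_mem ((PySem.Dict.contains_iff_mem_keys d k).mp h)]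
  · rw [PySem.Dict.keys_insert_of_not_contains d v (by simpa using h),
      PySem.Set.add_of_not_mem (fun hm => h ((PySem.Dict.contains_iff_mem_keys d k).mpr hm))]

lemma keys_insert_eq_add_int (d : PySem.Dict String Int) (k : String) (v : Int) :
    (d.insert k v).keys = PySem.Set.add d.keys k := by
  by_cases h : d.contains k = true
  · rw [PySem.Dict.keys_insert_of_contains d v h, PySem.Set.add_of_mem ((PySem.Dict.contains_iff_mem_keys d k).mp h)]
  · rw [PySem.Dict.keys_insert_of_not_contains d v (by simpa using h),
      PySem.Set.add_of_not_mem (fun hm => h ((PySem.Dict.contains_iff_mem_keys d k).mpr hm))]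

lemma bstep_eq_astep (g : PySem.Dict String (PySem.Set String)) (row : List String) :
    bGraphStep g row = aGraphStep g row := by
  unfold bGraphStep aGraphStep
  have hsd : ∀ (d : PySem.Dict String (PySem.Set String)) (k : String) (w : PySem.Set String),
      (d.setdefault k PySem.Set.empty).insert k w = d.insert k w := by
    intro d k w
    by_cases h : d.contains k = true
    · rw [PySem.Dict.setdefault_of_contains d _ h]
    · rw [PySem.Dict.setdefault_of_not_contains d _ (by simpa using h), PySem.Dict.insert_insert_self]
  simp only [PySem.Dict.getD_setdefault_self, hsd]

lemma gfold_keys (friends : List (List String)) (g : PySem.Dict String (PySem.Set String)) :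
    (friends.foldl aGraphStep g).keys = PySem.Set.update g.keys (flat2 friends) := by
  induction friends generalizing g with
  | nil => simp [flat2, PySem.Set.update_nil]
  | cons row rest ih =>
      rw [List.foldl_cons, ih]
      have hstep : (aGraphStep g row).keys = PySem.Set.update g.keys [row.getD 0 "", row.getD 1 ""] := by
        unfold aGraphStep
        simp only [keys_insert_eq_add]
        rw [PySem.Set.update_cons, PySem.Set.update_cons, PySem.Set.update_nil]
      rw [hstep, ← PySem.Set.update_append]
      congr 1

lemma pfold_keys (friends : List (List String)) (p : PySem.Dict String Int) :
    (friends.foldl aPointsStep p).keys = PySem.Set.update p.keys (flat2 friends) := by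
  induction friends generalizing p with
  | nil => simp [flat2, PySem.Set.update_nil]
  | cons row rest ih =>
      rw [List.foldl_cons, ih]
      have hstep : (aPointsStep p row).keys = PySem.Set.update p.keys [row.getD 0 "", row.getD 1 ""] := by
        unfold aPointsStep
        simp only [keys_insert_eq_add_int]
        rw [PySem.Set.update_cons, PySem.Set.update_cons, PySem.Set.update_nil]
      rw [hstep, ← PySem.Set.update_append]
      congr 1

lemma pfold_getD_zero (friends : List (List String)) (p : PySem.Dict String Int)
    (hp : ∀ x, p.getD x 0 = 0) (x : String) : (friends.foldl aPointsStep p).getD x 0 = 0 := by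
  induction friends generalizing p with
  | nil => simpa using hp x
  | cons row rest ih =>
      rw [List.foldl_cons]
      exact ih _ (fun y => by
        unfold aPointsStep
        rw [PySem.Dict.getD_insert, PySem.Dict.getD_insert]
        split_ifs <;> simp [hp])

lemma mem_astep_core (g : PySem.Dict String (PySem.Set String)) (u1 u2 a b : String) :
    a ∈ ((g.insert u1 ((g.getD u1 PySem.Set.empty).add u2)).insert u2
          (((g.insert u1 ((g.getD u1 PySem.Set.empty).add u2)).getD u2 PySem.Set.empty).add u1)).getD b PySem.Set.empty ↔
      a ∈ g.getD b PySem.Set.empty ∨ ((a = u1 ∧ b = u2) ∨ (a = u2 ∧ b = u1)) := by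
  simp only [PySem.Dict.getD_insert]
  by_cases hb2 : b = u2
  · subst hb2
    by_cases h12 : b = u1
    · subst h12
      simp [PySem.Set.mem_add]
    · simp [h12, PySem.Set.mem_add]
  · by_cases hb1 : b = u1
    · subst hb1
      simp [hb2, PySem.Set.mem_add]
    · simp [hb2, hb1]

lemma mem_astep_getD (g : PySem.Dict String (PySem.Set String)) (row : List String) (a b : String) :
    a ∈ (aGraphStep g row).getD b PySem.Set.empty ↔
      a ∈ g.getD b PySem.Set.empty ∨
        ((a = row.getD 0 "" ∧ b = row.getD 1 "") ∨ (a = row.getD 1 "" ∧ b = row.getD 0 "")) := by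
  unfold aGraphStep
  exact mem_astep_core g _ _ a b
lemma gfold_mem (friends : List (List String)) (g : PySem.Dict String (PySem.Set String)) (a b : String) :
    a ∈ (friends.foldl aGraphStep g).getD b PySem.Set.empty ↔
      a ∈ g.getD b PySem.Set.empty ∨ FriendRel friends a b := by
  induction friends generalizing g with
  | nil => simp [FriendRel]
  | cons row rest ih =>
      rw [List.foldl_cons, ih, mem_astep_getD]
      simp only [FriendRel, List.mem_cons]
      constructor
      · rintro ((h | h) | ⟨r, hr, hor⟩)
        · exact Or.inl h
        · exact Or.inr ⟨row, Or.inl rfl, h⟩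
        · exact Or.inr ⟨r, Or.inr hr, hor⟩
      · rintro (h | ⟨r, (rfl | hr), hor⟩)
        · exact Or.inl (Or.inl h)
        · exact Or.inl (Or.inr hor)
        · exact Or.inr ⟨r, hr, hor⟩

lemma friendrel_symm (friends : List (List String)) (a b : String) :
    FriendRel friends a b ↔ FriendRel friends b a := by
  unfold FriendRel
  constructor <;> (rintro ⟨r, hr, h | h⟩; exacts [⟨r, hr, Or.inr ⟨h.2, h.1⟩⟩, ⟨r, hr, Or.inl ⟨h.2, h.1⟩⟩])

lemma friendrel_mem_flat2 (friends : List (List String)) (a b : String) (h : FriendRel friends a b) :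
    a ∈ flat2 friends ∧ b ∈ flat2 friends := by
  obtain ⟨r, hr, h | h⟩ := h <;>
    refine ⟨?_, ?_⟩ <;> rw [flat2, List.mem_flatMap] <;> exact ⟨r, hr, by simp [h.1, h.2]⟩

lemma astep_getD_nodup (g : PySem.Dict String (PySem.Set String)) (row : List String)
    (h : ∀ x, (g.getD x PySem.Set.empty).Nodup) (x : String) :
    ((aGraphStep g row).getD x PySem.Set.empty).Nodup := by
  unfold aGraphStep
  simp only [PySem.Dict.getD_insert]
  split_ifs
  · exact PySem.Set.nodup_add _ _ (PySem.Set.nodup_add _ _ (h _))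
  · exact PySem.Set.nodup_add _ _ (h _)
  · exact PySem.Set.nodup_add _ _ (h _)
  · exact h _

lemma gfold_getD_nodup (friends : List (List String)) (g : PySem.Dict String (PySem.Set String))
    (h : ∀ x, (g.getD x PySem.Set.empty).Nodup) (x : String) :
    ((friends.foldl aGraphStep g).getD x PySem.Set.empty).Nodup := by
  induction friends generalizing g with
  | nil => exact h x
  | cons row rest ih => exact ih _ (astep_getD_nodup g row h)

-- the graph component of a visit step: a defaultdict read inserts only an empty entry,
-- so every getD value is unchanged
lemma vstep_graph_getD (user : String) (st : PySem.Dict String (PySem.Set String) × PySem.Dict String Int)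
    (v x : String) :
    ((aVisitStep user st v).1).getD x PySem.Set.empty = st.1.getD x PySem.Set.empty := by
  unfold aVisitStep
  by_cases h : st.1.contains v = true
  · simp [h]
  · simp only [h, if_false, Bool.false_eq_true]
    rw [PySem.Dict.getD_insert]
    split_ifs with hx
    · subst hx
      exact (PySem.Dict.getD_of_not_contains st.1 _ (by simpa using h)).symm
    · rfl

lemma vfold_graph_getD (user : String) (visitors : List String)
    (st : PySem.Dict String (PySem.Set String) × PySem.Dict String Int) (x : String) :
    ((visitors.foldl (aVisitStep user) st).1).getD x PySem.Set.empty = st.1.getD x PySem.Set.empty := by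
  induction visitors generalizing st with
  | nil => rfl
  | cons v rest ih => rw [List.foldl_cons, ih, vstep_graph_getD]

lemma modify10_fold (l : List String) (d : PySem.Dict String Int) (x : String) :
    (l.foldl (fun d t => d.modify t 0 (· + 10)) d).getD x 0 = d.getD x 0 + 10 * l.count x := by
  induction l generalizing d with
  | nil => simp
  | cons t rest ih =>
      rw [List.foldl_cons, ih, PySem.Dict.getD_modify]
      by_cases h : x = t
      · subst h
        simp
        ring
      · simp [h, eq_comm]
-- one visit step, points side: +1 at the visitor, +10 at each non-user friend of the visitor
lemma vstep_points_getD (user : String) (st : PySem.Dict String (PySem.Set String) × PySem.Dict String Int)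
    (v x : String) (hx : x ≠ user) :
    ((aVisitStep user st v).2).getD x 0 =
      st.2.getD x 0 + (if x = v then 1 else 0) + 10 * ((st.1.getD v PySem.Set.empty).count x) := by
  unfold aVisitStep
  have hnbrs : (if st.1.contains v = true then st.1 else st.1.insert v PySem.Set.empty).getD v PySem.Set.empty
      = st.1.getD v PySem.Set.empty := by
    by_cases h : st.1.contains v = true
    · simp [h]
    · simp only [h, if_false, Bool.false_eq_true, PySem.Dict.getD_insert]
      exact (PySem.Dict.getD_of_not_contains st.1 _ (by simpa using h)).symm
  simp only [hnbrs]
  have hrw := PySem.List.foldl_ite_eq_foldl_filter (fun t => t ≠ user)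
      (fun (pts : PySem.Dict String Int) t => pts.modify t 0 (· + 10))
      (st.1.getD v PySem.Set.empty) (st.2.modify v 0 (· + 1))
  rw [hrw, modify10_fold, List.count_filter (by simpa using hx), PySem.Dict.getD_modify]
  split_ifs with h
  · subst h; ring
  · ring

lemma vfold_points_getD (user : String) (visitors : List String)
    (g : PySem.Dict String (PySem.Set String)) (p : PySem.Dict String Int)
    (hnd : ∀ y, (g.getD y PySem.Set.empty).Nodup) (x : String) (hx : x ≠ user) :
    ((visitors.foldl (aVisitStep user) (g, p)).2).getD x 0 =
      p.getD x 0 + visitors.count x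
        + 10 * (visitors.countP (fun v => decide (x ∈ g.getD v PySem.Set.empty))) := by
  induction visitors generalizing g p with
  | nil => simp
  | cons v rest ih =>
      rw [List.foldl_cons]
      have hstep : aVisitStep user (g, p) v =
          ((aVisitStep user (g, p) v).1, (aVisitStep user (g, p) v).2) := rfl
      rw [hstep, ih _ _ (fun y => by rw [vstep_graph_getD]; exact hnd y)]
      rw [vstep_points_getD user (g, p) v x hx]
      have hcongr : (rest.countP fun w => decide (x ∈ ((aVisitStep user (g, p) v).1).getD w PySem.Set.empty))
          = rest.countP fun w => decide (x ∈ g.getD w PySem.Set.empty) := by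
        apply List.countP_congr
        intro w _
        rw [vstep_graph_getD]
      rw [hcongr]
      have hcnt : ((g.getD v PySem.Set.empty).count x : Int)
          = if x ∈ g.getD v PySem.Set.empty then 1 else 0 := by
        by_cases hm : x ∈ g.getD v PySem.Set.empty
        · rw [List.count_eq_one_of_mem (hnd v) hm, if_pos hm]; simp
        · rw [List.count_eq_zero_of_not_mem hm, if_neg hm]; simp
      rw [hcnt, List.count_cons, List.countP_cons]
      have e1 : (if (v == x) = true then (1:Nat) else 0) = (if x = v then 1 else 0) := by
        by_cases hxv : x = v
        · rw [if_pos (by simp [hxv]), if_pos hxv]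
        · rw [if_neg (by simp; exact fun hh => hxv hh.symm), if_neg hxv]
      have e2 : (if (decide (x ∈ g.getD v PySem.Set.empty)) = true then (1:Nat) else 0)
          = (if x ∈ g.getD v PySem.Set.empty then 1 else 0) := by
        by_cases hm : x ∈ g.getD v PySem.Set.empty
        · rw [if_pos (decide_eq_true hm), if_pos hm]
        · rw [if_neg (by rw [decide_eq_false hm]; exact Bool.false_ne_true), if_neg hm]
      rw [e1, e2]
      split_ifs <;> push_cast <;> ring
lemma inner_contains_mono (user y : String) (l : List String) (d : PySem.Dict String Int)
    (h : d.contains y = true) :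
    (l.foldl (fun pts t => if t ≠ user then pts.modify t 0 (· + 10) else pts) d).contains y = true := by
  induction l generalizing d with
  | nil => exact h
  | cons t rest ih =>
      rw [List.foldl_cons]
      apply ih
      by_cases ht : t ≠ user
      · rw [if_pos ht, PySem.Dict.contains_modify, h, Bool.or_true]
      · rw [if_neg ht]; exact h

lemma inner_keys (user : String) (l : List String) (d : PySem.Dict String Int)
    (h : ∀ t ∈ l, d.contains t = true) :
    (l.foldl (fun pts t => if t ≠ user then pts.modify t 0 (· + 10) else pts) d).keys = d.keys := by
  induction l generalizing d with
  | nil => rfl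
  | cons t rest ih =>
      rw [List.foldl_cons]
      have hstep : (if t ≠ user then d.modify t 0 (· + 10) else d).keys = d.keys := by
        by_cases ht : t ≠ user
        · rw [if_pos ht, PySem.Dict.keys_modify,
            PySem.Dict.keys_insert_of_contains d _ (h t (List.mem_cons_self))]
        · rw [if_neg ht]
      rw [ih _ (fun t' ht' => by
        by_cases ht : t ≠ user
        · rw [if_pos ht, PySem.Dict.contains_modify, h t' (List.mem_cons_of_mem t ht'), Bool.or_true]
        · rw [if_neg ht]; exact h t' (List.mem_cons_of_mem t ht')), hstep]

lemma vstep_points_keys (user : String) (st : PySem.Dict String (PySem.Set String) × PySem.Dict String Int)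
    (v : String) (h : ∀ t ∈ st.1.getD v PySem.Set.empty, st.2.contains t = true) :
    ((aVisitStep user st v).2).keys = PySem.Set.add st.2.keys v := by
  unfold aVisitStep
  have hnbrs : (if st.1.contains v = true then st.1 else st.1.insert v PySem.Set.empty).getD v PySem.Set.empty
      = st.1.getD v PySem.Set.empty := by
    by_cases hc : st.1.contains v = true
    · simp [hc]
    · simp only [hc, if_false, Bool.false_eq_true, PySem.Dict.getD_insert]
      exact (PySem.Dict.getD_of_not_contains st.1 _ (by simpa using hc)).symm
  simp only [hnbrs]
  rw [inner_keys user _ _ (fun t ht => by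
      rw [PySem.Dict.contains_modify, h t ht, Bool.or_true]),
    PySem.Dict.keys_modify, keys_insert_eq_add_int]

lemma vstep_points_contains_mono (user y : String)
    (st : PySem.Dict String (PySem.Set String) × PySem.Dict String Int) (v : String)
    (h : st.2.contains y = true) : ((aVisitStep user st v).2).contains y = true := by
  unfold aVisitStep
  apply inner_contains_mono
  rw [PySem.Dict.contains_modify, h, Bool.or_true]

lemma vfold_points_keys (user : String) (visitors : List String)
    (g : PySem.Dict String (PySem.Set String)) (p : PySem.Dict String Int)
    (hsub : ∀ v x, x ∈ g.getD v PySem.Set.empty → p.contains x = true) :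
    ((visitors.foldl (aVisitStep user) (g, p)).2).keys = PySem.Set.update p.keys visitors := by
  induction visitors generalizing g p with
  | nil => simp [PySem.Set.update_nil]
  | cons v rest ih =>
      rw [List.foldl_cons]
      have hst : aVisitStep user (g, p) v = ((aVisitStep user (g, p) v).1, (aVisitStep user (g, p) v).2) := rfl
      rw [hst, ih _ _ (fun v' x hx => by
        rw [vstep_graph_getD] at hx
        exact vstep_points_contains_mono user x (g, p) v (hsub v' x hx))]
      rw [vstep_points_keys user (g, p) v (fun t ht => hsub v t ht), PySem.Set.update_cons]

lemma sum_indicator_not_mem (S : List String) (v : String) (h : v ∉ S) :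
    (S.map (fun f => if (v == f) = true then (1:Nat) else 0)).sum = 0 := by
  induction S with
  | nil => rfl
  | cons f rest ih =>
      rw [List.map_cons, List.sum_cons, if_neg (by simp; exact fun hh => h (hh ▸ List.mem_cons_self)),
        ih (fun hm => h (List.mem_cons_of_mem f hm))]

lemma sum_indicator (S : List String) (v : String) (hS : S.Nodup) :
    (S.map (fun f => if (v == f) = true then (1:Nat) else 0)).sum = if v ∈ S then 1 else 0 := by
  induction S with
  | nil => rfl
  | cons f rest ih =>
      rw [List.map_cons, List.sum_cons]
      by_cases hv : v = f
      · subst hv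
        rw [if_pos (by simp), sum_indicator_not_mem rest v (by
            intro hm; exact (List.nodup_cons.mp hS).1 hm), if_pos List.mem_cons_self]
      · rw [if_neg (by simp [hv]), ih (List.nodup_cons.mp hS).2]
        by_cases hm : v ∈ rest
        · rw [if_pos hm, if_pos (List.mem_cons_of_mem f hm)]
        · rw [if_neg hm, if_neg (by simp [hv, hm])]

lemma countP_mem_eq_sum_counts (l S : List String) (hS : S.Nodup) :
    l.countP (fun v => decide (v ∈ S)) = (S.map (fun f => l.count f)).sum := by
  induction l with
  | nil => simp
  | cons v rest ih =>
      rw [List.countP_cons, ih]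
      have : (S.map fun f => List.count f (v :: rest)) =
          S.map (fun f => List.count f rest + if (v == f) = true then 1 else 0) := by
        apply List.map_congr_left
        intro f _
        rw [List.count_cons]
      rw [this, List.sum_map_add, sum_indicator S v hS]
      by_cases hm : v ∈ S
      · rw [if_pos hm, if_pos (decide_eq_true hm)]
      · rw [if_neg hm, if_neg (by rw [decide_eq_false hm]; exact Bool.false_ne_true)]
-- Python's tuple key (k1 x, k2 x) as a single lexicographic key
lemma sorted2_eq_sorted_toLex {α : Type} (xs : List α) (k1 : α → Int) (k2 : α → String) :
    PySem.List.sorted2 xs k1 k2 false = PySem.List.sorted xs (fun x => toLex (k1 x, k2 x)) := by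
  rw [PySem.List.sorted_eq_foldl_insertBy]
  have key_eq : (fun a b => decide (k1 a < k1 b) || (!decide (k1 b < k1 a) && decide (k2 a < k2 b)))
      = (fun a b : α => decide (toLex (k1 a, k2 a) < toLex (k1 b, k2 b))) := by
    funext a b
    rw [Bool.eq_iff_iff]
    simp only [Bool.or_eq_true, Bool.and_eq_true, Bool.not_eq_true', decide_eq_true_eq,
      decide_eq_false_iff_not, Prod.Lex.toLex_lt_toLex]
    constructor
    · rintro (h | ⟨h1, h2⟩)
      · exact Or.inl h
      · rcases lt_or_eq_of_le (not_lt.mp h1) with hlt | heq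
        · exact Or.inl hlt
        · exact Or.inr ⟨heq, h2⟩
    · rintro (h | ⟨he, h2⟩)
      · exact Or.inl h
      · exact Or.inr ⟨by rw [he]; exact lt_irrefl _, h2⟩
  simp only [PySem.List.sorted2, Bool.false_eq_true, if_false, key_eq]

lemma key2_injective (score : String → Int) :
    Function.Injective (fun x : String => toLex (-(score x), x)) := by
  intro a b h
  have := congrArg (fun y : Lex (Int × String) => (ofLex y).2) h
  simpa using this
lemma main_eq (user : String) (friends : List (List String)) (visitors : List String) :
    solution user friends visitors = solution_alt user friends visitors := by
  simp only [solution, solution_alt]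
  rw [PySem.List.foldl_prod_mk (f := aGraphStep) (g := aPointsStep)]
  -- names for the two sides' data
  set g0 := friends.foldl aGraphStep PySem.Dict.empty with hg0def
  set p0 := friends.foldl aPointsStep PySem.Dict.empty with hp0def
  set ST := visitors.foldl (aVisitStep user) (g0, p0) with hSTdef
  set visits := PySem.Dict.counter visitors with hvisitsdef
  -- B's graph is A's graph
  have hgB : friends.foldl bGraphStep PySem.Dict.empty = g0 :=
    PySem.List.foldl_congr_mem friends bGraphStep aGraphStep _ (fun acc x _ => bstep_eq_astep acc x)
  rw [hgB]
  have hnd0 : ∀ y, (g0.getD y PySem.Set.empty).Nodup := fun y =>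
    gfold_getD_nodup friends _ (fun x => by rw [PySem.Dict.getD_empty]; exact List.nodup_nil) y
  have hmem0 : ∀ a b, a ∈ g0.getD b PySem.Set.empty ↔ FriendRel friends a b := by
    intro a b
    rw [hg0def, gfold_mem]
    simp [PySem.Dict.getD_empty]
  have hGEnd : ∀ x, ST.1.getD x PySem.Set.empty = g0.getD x PySem.Set.empty := fun x =>
    vfold_graph_getD user visitors (g0, p0) x
  have hg0keys : g0.keys = PySem.Set.ofList (flat2 friends) := by
    rw [hg0def, gfold_keys]
    simp [PySem.Dict.keys_empty, PySem.Set.update_nil_left]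
  have hp0keys : p0.keys = PySem.Set.ofList (flat2 friends) := by
    rw [hp0def, pfold_keys]
    simp [PySem.Dict.keys_empty, PySem.Set.update_nil_left]
  have hsub : ∀ v x, x ∈ g0.getD v PySem.Set.empty → p0.contains x = true := by
    intro v x hx
    rw [PySem.Dict.contains_iff_mem_keys, hp0keys, PySem.Set.mem_ofList]
    exact (friendrel_mem_flat2 friends x v ((hmem0 x v).mp hx)).1
  have hPkeys : ST.2.keys = PySem.Set.update (PySem.Set.ofList (flat2 friends)) visitors := by
    rw [hSTdef, vfold_points_keys user visitors g0 p0 hsub, hp0keys]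
  have hcand : PySem.List.dedup (g0.keys ++ visitors) = ST.2.keys := by
    rw [hg0keys, hPkeys, PySem.List.dedup_eq_ofList, PySem.Set.ofList_append, PySem.Set.ofList_ofList]
  have hkeysnd : ST.2.keys.Nodup := by
    rw [hPkeys]
    exact PySem.Set.nodup_update _ _ (PySem.Set.nodup_ofList _)
  -- the value identity: scatter = gather
  have hval : ∀ x, x ≠ user → ST.2.getD x 0 = bScore visits g0 x := by
    intro x hx
    have hp0zero : p0.getD x 0 = 0 := by
      rw [hp0def]; exact pfold_getD_zero friends PySem.Dict.empty (fun y => PySem.Dict.getD_empty y 0) x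
    rw [hSTdef, vfold_points_getD user visitors g0 p0 hnd0 x hx, hp0zero]
    have hsym : (visitors.countP fun v => decide (x ∈ g0.getD v PySem.Set.empty))
        = visitors.countP (fun v => decide (v ∈ g0.getD x PySem.Set.empty)) := by
      apply List.countP_congr
      intro v _
      have hvx : (x ∈ g0.getD v PySem.Set.empty) ↔ (v ∈ g0.getD x PySem.Set.empty) := by
        rw [hmem0, hmem0, friendrel_symm]
      simp only [decide_eq_true_eq]; exact hvx
    rw [hsym, countP_mem_eq_sum_counts visitors _ (hnd0 x)]
    unfold bScore
    rw [hvisitsdef, PySem.Dict.getD_counter]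
    have hmapc : ((g0.getD x PySem.Set.empty).map (fun f => (PySem.Dict.counter visitors).getD f 0)).sum
        = ((g0.getD x PySem.Set.empty).map (fun f => (visitors.count f : Int))).sum := by
      congr 1
      apply List.map_congr_left
      intro f _
      rw [PySem.Dict.getD_counter]
    rw [hmapc]
    rw [Nat.cast_list_sum, List.map_map]
    ring_nf
    rfl
  -- final assembly
  rw [hGEnd user, hcand]
  rw [PySem.List.foldl_append_ite_eq_filter
      (p := fun name => name ≠ user ∧ ¬(g0.getD user PySem.Set.empty).contains name = true ∧ ST.2.getD name 0 > 0)]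
  have hbody : ∀ (acc : List (Int × String)) (name : String),
      (if name = user ∨ (g0.getD user PySem.Set.empty).contains name = true then acc
       else if bScore visits g0 name > 0 then acc ++ [(bScore visits g0 name, name)] else acc)
      = (if (¬(name = user ∨ (g0.getD user PySem.Set.empty).contains name = true) ∧ bScore visits g0 name > 0)
         then acc ++ [(bScore visits g0 name, name)] else acc) := by
    intro acc name
    by_cases h1 : name = user ∨ (g0.getD user PySem.Set.empty).contains name = true
    · rw [if_pos h1, if_neg (fun hc => hc.1 h1)]
    · rw [if_neg h1]
      by_cases h2 : bScore visits g0 name > 0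
      · rw [if_pos h2, if_pos ⟨h1, h2⟩]
      · rw [if_neg h2, if_neg (fun hc => h2 hc.2)]
  rw [PySem.List.foldl_congr_mem _ _ _ _ (fun acc x _ => hbody acc x)]
  rw [PySem.List.foldl_append_ite
      (p := fun name => ¬(name = user ∨ (g0.getD user PySem.Set.empty).contains name = true)
        ∧ bScore visits g0 name > 0)
      (f := fun name => (bScore visits g0 name, name))]
  rw [sorted2_eq_sorted_toLex, sorted2_eq_sorted_toLex, List.nil_append, List.nil_append]
  set key' : String → Lex (Int × String) := fun x => toLex (-(bScore visits g0 x), x) with hkey'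
  set pAdec : String → Bool := fun name =>
    decide (name ≠ user ∧ ¬(g0.getD user PySem.Set.empty).contains name = true ∧ ST.2.getD name 0 > 0) with hpA
  set pBdec : String → Bool := fun name =>
    decide (¬(name = user ∨ (g0.getD user PySem.Set.empty).contains name = true)
      ∧ bScore visits g0 name > 0) with hpB
  set fB : String → Int × String := fun name => (bScore visits g0 name, name) with hfB
  have hpred : ∀ x, pAdec x = pBdec x := by
    intro x
    rw [hpA, hpB]
    apply decide_eq_decide.mpr
    constructor
    · rintro ⟨h1, h2, h3⟩
      refine ⟨fun h => ?_, by rw [← hval x h1]; exact h3⟩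
      rcases h with he | hc
      · exact h1 he
      · exact h2 hc
    · rintro ⟨hn, hs⟩
      have h1 : x ≠ user := fun he => hn (Or.inl he)
      exact ⟨h1, fun hc => hn (Or.inr hc), by rw [hval x h1]; exact hs⟩
  have hApm : (List.filter pAdec (PySem.List.sorted ST.2.keys (fun x => toLex (-ST.2.getD x 0, x)))).Perm
      (List.filter pBdec ST.2.keys) := by
    have h := List.Perm.filter pAdec (PySem.List.sorted_perm ST.2.keys (fun x => toLex (-ST.2.getD x 0, x)) false)
    have hfc : List.filter pAdec ST.2.keys = List.filter pBdec ST.2.keys :=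
      List.filter_congr (fun x _ => hpred x)
    rwa [hfc] at h
  have hBpm : (List.map (fun t : Int × String => t.2)
        (PySem.List.sorted (List.map fB (List.filter pBdec ST.2.keys)) (fun t => toLex (-t.1, t.2)))).Perm
      (List.filter pBdec ST.2.keys) := by
    have h := (PySem.List.sorted_perm (List.map fB (List.filter pBdec ST.2.keys))
        (fun t => toLex (-t.1, t.2)) false).map (fun t : Int × String => t.2)
    simpa [List.map_map, hfB, Function.comp_def, List.map_id'] using h
  have hPWA : (List.filter pAdec (PySem.List.sorted ST.2.keys (fun x => toLex (-ST.2.getD x 0, x)))).Pairwise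
      (fun a b => key' a ≤ key' b) := by
    have h0 := (PySem.List.sorted_pairwise ST.2.keys (fun x => toLex (-ST.2.getD x 0, x))).filter pAdec
    refine h0.imp_of_mem ?_
    intro a b ha hb hr
    have hpa := of_decide_eq_true (List.mem_filter.mp ha).2
    have hpb := of_decide_eq_true (List.mem_filter.mp hb).2
    have ea : key' a = toLex (-ST.2.getD a 0, a) := by
      simp only [hkey']
      rw [hval a hpa.1]
    have eb : key' b = toLex (-ST.2.getD b 0, b) := by
      simp only [hkey']
      rw [hval b hpb.1]
    rw [ea, eb]
    exact hr
  have hPWB : (List.map (fun t : Int × String => t.2)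
        (PySem.List.sorted (List.map fB (List.filter pBdec ST.2.keys)) (fun t => toLex (-t.1, t.2)))).Pairwise
      (fun a b => key' a ≤ key' b) := by
    rw [List.pairwise_map]
    have h0 := PySem.List.sorted_pairwise (List.map fB (List.filter pBdec ST.2.keys))
      (fun t => toLex (-t.1, t.2))
    refine h0.imp_of_mem ?_
    intro s t hs ht hr
    rw [PySem.List.mem_sorted] at hs ht
    obtain ⟨xs, -, rfl⟩ := List.mem_map.mp hs
    obtain ⟨xt, -, rfl⟩ := List.mem_map.mp ht
    simpa [hkey', hfB] using hr
  exact PySem.List.eq_of_perm_of_pairwise_le_of_injective key' (key2_injective _)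
    (hApm.trans hBpm.symm) hPWA hPWB

-- ===== VERDICT (by name: the statement is the Claim_ definition above) =====
theorem solution_spec : Claim_equal_solution := by
  intro user friends visitors _ _
  unfold Spec_solution
  exact main_eq user friends visitors
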